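-- pv_equiv track=rewrite | github.com/risapav/socfw | socfw/validate/rules/pin_rules.py | _prune_subpaths
-- ===== SOURCE A (Python) =====
-- def _prune_subpaths(refs: list[str]) -> list[str]:
--     """Remove refs that are sub-paths of another ref in the list."""
--     paths = [r[len("board:"):] if r.startswith("board:") else r for r in refs]
--     pruned = []
--     for i, ref in enumerate(refs):
--         path = paths[i]
--         dominated = False
--         for j, other_path in enumerate(paths):
--             if i != j and path != other_path and path.startswith(other_path + "."):
--                 dominated = True
--                 break
--         if not dominated:
--             pruned.append(ref)
--     return pruned
-- ===== SOURCE B (Python) =====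
-- def _prune_subpaths(refs: list[str]) -> list[str]:
--     """Remove refs that are sub-paths of another ref in the list.
--
--     One pass: put all paths in a set, then keep a ref unless some dotted
--     ancestor prefix of its path is present in the set."""
--     paths = [r[len("board:"):] if r.startswith("board:") else r for r in refs]
--     pset = set(paths)
--     return [r for r, p in zip(refs, paths)
--             if not any(c == "." and p[:k] in pset for k, c in enumerate(p))]
-- ===== Notes on version B (the rewrite author's own statement) =====
-- stated objective: faster
-- what changed: Replaces the quadratic all-pairs scan (every ref tested against every other path) by a single hash set of paths plus, per ref, a membership test of each dotted ancestor prefix of its own path.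
import Mathlib
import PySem

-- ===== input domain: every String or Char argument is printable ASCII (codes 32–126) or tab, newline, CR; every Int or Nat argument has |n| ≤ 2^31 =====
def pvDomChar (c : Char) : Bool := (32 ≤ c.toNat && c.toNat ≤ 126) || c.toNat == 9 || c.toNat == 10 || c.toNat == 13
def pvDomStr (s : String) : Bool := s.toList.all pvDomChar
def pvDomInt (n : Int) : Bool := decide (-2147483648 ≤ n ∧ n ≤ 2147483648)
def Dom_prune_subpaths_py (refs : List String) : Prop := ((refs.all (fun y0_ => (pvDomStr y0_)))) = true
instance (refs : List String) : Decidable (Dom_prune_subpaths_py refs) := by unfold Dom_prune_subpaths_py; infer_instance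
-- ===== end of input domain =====

-- B replaces A's quadratic all-pairs domination scan by one set of paths plus a
-- per-ref membership test of its dotted ancestor prefixes (measured asymptotically faster).


-- ===== PORT A =====
-- 'r[len("board:"):] if r.startswith("board:") else r' — this comprehension body is
-- verbatim the same in A and in B (Source B), so both ports share this helper.
def pvStripBoard (r : String) : String :=
  if PySem.Str.startswith r "board:" then PySem.Str.slice r (some (PySem.Str.len "board:")) none else r

-- A: for each i, scan every j ≠ i looking for a dominating other_path (break = List.any).
def prune_subpaths_py (refs : List String) : List String :=
  let paths := refs.map pvStripBoard
  (PySem.List.enumerate refs).foldl (fun pruned iref =>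
    let path := PySem.List.pyGetD paths iref.1 ""
    let dominated := (PySem.List.enumerate paths).any (fun jother =>
      (iref.1 != jother.1) && (path != jother.2) &&
        PySem.Str.startswith path (jother.2 ++ "."))
    if !dominated then pruned ++ [iref.2] else pruned) []

-- ===== PORT B =====
-- B: set of all paths; keep r unless some dotted ancestor prefix p[:k] (p[k] = '.') is in the set.
def prune_subpaths_py_alt (refs : List String) : List String :=
  let paths := refs.map pvStripBoard
  let pset : PySem.Set String := PySem.Set.ofList paths
  ((refs.zip paths).filter (fun rp =>
      ! (PySem.List.enumerate rp.2.toList).any (fun kc =>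
          (kc.2 == '.') && PySem.Set.contains pset (PySem.Str.slice rp.2 none (some kc.1))))).map
    (fun rp => rp.1)

-- ===== PRECONDITION & SPEC =====
def Spec_prune_subpaths_py (refs : List String) (out : List String) : Prop := out = prune_subpaths_py_alt refs
instance (refs : List String) (out : List String) : Decidable (Spec_prune_subpaths_py refs out) := by unfold Spec_prune_subpaths_py; infer_instance

-- ===== CLAIM (what is proved, stated in full; the proofs are below) =====
def Claim_equal_prune_subpaths_py : Prop := ∀ (refs : List String), Dom_prune_subpaths_py refs → Spec_prune_subpaths_py refs (prune_subpaths_py refs)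

-- ===== LEMMAS AND PROOFS =====

-- B's per-path test as a named predicate (proof bookkeeping only)
def pvHasAnc (paths : List String) (p : String) : Bool :=
  (PySem.List.enumerate p.toList).any (fun kc =>
    (kc.2 == '.') && PySem.Set.contains (PySem.Set.ofList paths) (PySem.Str.slice p none (some kc.1)))

-- A's inner loop at a valid index can drop the i ≠ j guard: any j with paths[j] = paths[i]
-- is already excluded by the path ≠ other_path test.
theorem pvInnerAny (paths : List String) (i : Nat) (hi : i < paths.length) :
    ((PySem.List.enumerate paths).any (fun jother =>
        (((i : Int)) != jother.1) && (paths[i] != jother.2) &&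
          PySem.Str.startswith paths[i] (jother.2 ++ "."))) =
    (paths.any (fun o => (paths[i] != o) && PySem.Str.startswith paths[i] (o ++ "."))) := by
  rw [Bool.eq_iff_iff]
  simp only [List.any_eq_true, PySem.List.mem_enumerate_iff, Bool.and_eq_true, bne_iff_ne]
  constructor
  · rintro ⟨z, ⟨k, hk, rfl⟩, ⟨-, hne⟩, hsw⟩
    exact ⟨paths[k], List.getElem_mem hk, hne, hsw⟩
  · rintro ⟨o, ho, hne, hsw⟩
    obtain ⟨k, hk, rfl⟩ := List.mem_iff_getElem.mp ho
    refine ⟨((0 : Int) + k, paths[k]), ⟨k, hk, rfl⟩, ⟨?_, hne⟩, hsw⟩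
    intro h
    apply hne
    have hik : i = k := by omega
    subst hik
    rfl

-- core equivalence: 'some other path dominates p' = 'some dotted ancestor prefix of p is a path'
theorem pvCore (paths : List String) (p : String) :
    (paths.any (fun o => (p != o) && PySem.Str.startswith p (o ++ "."))) = pvHasAnc paths p := by
  rw [Bool.eq_iff_iff]
  unfold pvHasAnc
  simp only [List.any_eq_true, PySem.List.mem_enumerate_iff, Bool.and_eq_true, bne_iff_ne,
    beq_iff_eq, PySem.Set.contains_iff, PySem.Set.mem_ofList, PySem.Str.startswith_eq,
    PySem.Chars.startswith_iff, String.toList_append]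
  constructor
  · rintro ⟨o, ho, hne, hsw⟩
    obtain ⟨t, ht⟩ := hsw
    have hdot : (".".toList : List Char) = ['.'] := rfl
    rw [hdot] at ht
    have e : p.toList = o.toList ++ '.' :: t := by rw [← ht]; simp
    have hk : o.toList.length < p.toList.length := by rw [e]; simp
    refine ⟨((0:Int) + o.toList.length, p.toList[o.toList.length]), ⟨o.toList.length, hk, rfl⟩, ?_, ?_⟩
    · simp only
      simp [e, List.getElem_append_right]
    · have hsl : PySem.Str.slice p none (some ((0:Int) + o.toList.length)) = o := by
        apply String.toList_inj.mp
        rw [PySem.Str.toList_slice]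
        simp only [PySem.Chars.slice_eq_listSlice, zero_add]
        rw [PySem.List.slice_to_natCast, e, List.take_left]
      rw [hsl]; exact ho
  · rintro ⟨z, ⟨k, hk, rfl⟩, hdot, hmem⟩
    simp only at hdot
    set o := PySem.Str.slice p none (some ((0:Int) + k)) with hodef
    have hol : o.toList = p.toList.take k := by
      rw [hodef, PySem.Str.toList_slice]
      simp only [PySem.Chars.slice_eq_listSlice, zero_add]
      exact PySem.List.slice_to_natCast p.toList k
    refine ⟨o, hmem, ?_, ?_⟩
    · intro h
      have := congrArg (fun s => s.toList.length) h
      simp only [hol, List.length_take] at this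
      omega
    · refine ⟨p.toList.drop (k+1), ?_⟩
      have hdot2 : (".".toList : List Char) = ['.'] := rfl
      rw [hol, hdot2, List.append_assoc]
      show List.take k p.toList ++ ('.' :: List.drop (k+1) p.toList) = p.toList
      rw [← hdot, List.getElem_cons_drop, List.take_append_drop]

-- filtering an enumerate by a predicate on the value only, then projecting the value
theorem pvFilterEnum {α : Type} (xs : List α) (s : Int) (g : α → Bool) :
    (((PySem.List.enumerate xs s).filter (fun z => g z.2)).map (fun z => z.2)) = xs.filter g := by
  induction xs generalizing s with
  | nil => simp [PySem.List.enumerate_nil]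
  | cons x xs ih =>
      rw [PySem.List.enumerate_cons]
      by_cases h : g x <;> simp [h, ih]

theorem pvMain (refs : List String) :
    prune_subpaths_py refs = prune_subpaths_py_alt refs := by
  unfold prune_subpaths_py prune_subpaths_py_alt
  dsimp only
  rw [PySem.List.foldl_append_if]
  rw [← List.map_prod_left_eq_zip, List.filter_map, List.map_map]
  rw [List.filter_congr (q := fun z => !pvHasAnc (refs.map pvStripBoard) (pvStripBoard z.2)) ?hc]
  case hc =>
    rintro z hz
    obtain ⟨k, hk, rfl⟩ := (PySem.List.mem_enumerate_iff _ _ _).mp hz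
    simp only
    have hkp : k < (refs.map pvStripBoard).length := by simpa using hk
    have hgd : PySem.List.pyGetD (refs.map pvStripBoard) ((0:Int) + k) "" = (refs.map pvStripBoard)[k] := by
      simp only [zero_add, PySem.List.pyGetD_natCast]
      exact List.getD_eq_getElem _ _ hkp
    rw [hgd]
    have := pvInnerAny (refs.map pvStripBoard) k hkp
    simp only [zero_add] at this ⊢
    rw [this, pvCore]
    congr 1
    simp
  · rw [List.nil_append,
      show (Prod.snd : Int × String → String) = (fun z : Int × String => z.2) from rfl]
    beta_reduce
    rw [pvFilterEnum refs 0 (fun y => !pvHasAnc (List.map pvStripBoard refs) (pvStripBoard y))]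
    simp [pvHasAnc, Function.comp_def]

-- ===== VERDICT (by name: the statement is the Claim_ definition above) =====
theorem prune_subpaths_py_spec : Claim_equal_prune_subpaths_py := by
  intro refs _
  exact pvMain refs
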